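-- pv_equiv track=rewrite | github.com/conniemessi/infer_missing | main_rule_b.py | get_subsequence_lengths
-- ===== SOURCE A (Python) =====
-- def get_subsequence_lengths(data_list):
--     if not data_list:
--         return []
--
--     zero_indices = [i for i, x in enumerate(data_list) if x == 0]
--
--     if not zero_indices:
--         return []
--
--     lengths = [0]
--     for k in range(len(zero_indices)):
--         start_index = zero_indices[k]
--
--         if k + 1 < len(zero_indices):
--             end_index = zero_indices[k+1]
--         else:
--             end_index = len(data_list)
--
--         lengths.append(end_index - start_index)
--
--     return lengths
-- ===== SOURCE B (Python) =====
-- def get_subsequence_lengths(data_list):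
--     result = [0]
--     count = None
--     for x in data_list:
--         if x == 0:
--             if count is not None:
--                 result.append(count)
--             count = 1
--         elif count is not None:
--             count += 1
--     if count is None:
--         return []
--     result.append(count)
--     return result
-- ===== Notes on version B (the rewrite author's own statement) =====
-- stated objective: simpler
-- what changed: Replaces the two-phase approach (collect all zero indices, then subtract consecutive indices by position) with a single streaming pass that keeps a running segment counter, flushed at each zero and once at the end; avoiding the intermediate index list and repeated indexing also makes it measurably faster by a constant factor.
import Mathlib
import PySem

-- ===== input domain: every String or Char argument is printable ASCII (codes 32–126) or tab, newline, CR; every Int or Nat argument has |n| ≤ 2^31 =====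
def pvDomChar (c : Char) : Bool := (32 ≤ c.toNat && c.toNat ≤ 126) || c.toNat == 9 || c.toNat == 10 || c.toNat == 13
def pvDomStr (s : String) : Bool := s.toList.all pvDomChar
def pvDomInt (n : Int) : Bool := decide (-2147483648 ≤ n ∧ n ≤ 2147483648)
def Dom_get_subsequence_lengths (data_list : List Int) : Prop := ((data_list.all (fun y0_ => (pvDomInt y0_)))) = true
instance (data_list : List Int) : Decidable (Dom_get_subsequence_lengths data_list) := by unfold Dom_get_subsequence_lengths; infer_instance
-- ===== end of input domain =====

-- One honest line: B streams once over the list with a running segment counter flushed at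
-- each zero (and at the end), instead of A's two-phase zero-index collection plus
-- consecutive-index differencing; objective: simpler.

-- ===== PORT A =====
def get_subsequence_lengths (data_list : List Int) : List Int :=
  if data_list.isEmpty then []
  else
    let zero_indices : List Int :=
      ((PySem.List.enumerate data_list 0).filter (fun p => p.2 == 0)).map (fun p => p.1)
    if zero_indices.isEmpty then []
    else
      (PySem.List.pyRange 0 (zero_indices.length : Int) 1).foldl
        (fun lengths k =>
          let start_index := PySem.List.pyGetD zero_indices k 0
          let end_index :=
            if k + 1 < (zero_indices.length : Int) then
              PySem.List.pyGetD zero_indices (k + 1) 0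
            else (data_list.length : Int)
          lengths ++ [end_index - start_index]) [0]

-- ===== PORT B =====
-- one step of B's loop over the elements
def pvBStep (acc : List Int × Option Int) (x : Int) : List Int × Option Int :=
  if x == 0 then
    ((match acc.2 with
      | some c => acc.1 ++ [c]
      | none => acc.1), some 1)
  else
    match acc.2 with
    | some c => (acc.1, some (c + 1))
    | none => acc

def get_subsequence_lengths_alt (data_list : List Int) : List Int :=
  let p := data_list.foldl pvBStep ([0], none)
  match p.2 with
  | none => []
  | some c => p.1 ++ [c]

-- ===== PRECONDITION & SPEC =====
def Spec_get_subsequence_lengths (data_list : List Int) (out : List Int) : Prop := out = get_subsequence_lengths_alt data_list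
instance (data_list : List Int) (out : List Int) : Decidable (Spec_get_subsequence_lengths data_list out) := by unfold Spec_get_subsequence_lengths; infer_instance

-- ===== CLAIM (what is proved, stated in full; the proofs are below) =====
def Claim_equal_get_subsequence_lengths : Prop := ∀ (data_list : List Int), Dom_get_subsequence_lengths data_list → Spec_get_subsequence_lengths data_list (get_subsequence_lengths data_list)

-- ===== LEMMAS AND PROOFS =====

-- positions of zeros in l, absolute, starting at index s
def pvZPos : List Int → Int → List Int
  | [], _ => []
  | x :: xs, s => if x = 0 then s :: pvZPos xs (s + 1) else pvZPos xs (s + 1)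

-- consecutive differences of a position list, closed with sentinel m
def pvPd : List Int → Int → List Int
  | [], _ => []
  | [a], m => [m - a]
  | a :: b :: t, m => (b - a) :: pvPd (b :: t) m

-- segment lengths emitted by B once a zero has been seen, current counter c
def pvSegs : List Int → Int → List Int
  | [], c => [c]
  | x :: xs, c => if x = 0 then c :: pvSegs xs 1 else pvSegs xs (c + 1)

-- B's finalization
def pvFin (p : List Int × Option Int) : List Int :=
  match p.2 with
  | none => []
  | some c => p.1 ++ [c]

lemma pvEnumFilter : ∀ (l : List Int) (s : Int),
    ((PySem.List.enumerate l s).filter (fun p => p.2 == 0)).map (fun p => p.1) = pvZPos l s := by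
  intro l
  induction l with
  | nil => intro s; simp [PySem.List.enumerate_nil, pvZPos]
  | cons x xs ih =>
    intro s
    rw [PySem.List.enumerate_cons]
    by_cases hx : x = 0 <;> simp [pvZPos, hx, ih]

lemma pvSegs_of_zpos_nil : ∀ (l : List Int) (s c : Int),
    pvZPos l s = [] → pvSegs l c = [c + l.length] := by
  intro l
  induction l with
  | nil => intro s c _; simp [pvSegs]
  | cons x xs ih =>
    intro s c hz
    by_cases hx : x = 0
    · simp [pvZPos, hx] at hz
    · simp only [pvZPos, if_neg hx] at hz
      simp only [pvSegs, if_neg hx, List.length_cons]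
      rw [ih (s + 1) (c + 1) hz]
      simp only [List.cons.injEq, and_true]
      push_cast; ring

lemma pvSegs_of_zpos_cons : ∀ (l : List Int) (s c j : Int) (rest : List Int),
    pvZPos l s = j :: rest →
    pvSegs l c = (c + (j - s)) :: pvPd (j :: rest) (s + l.length) := by
  intro l
  induction l with
  | nil => intro s c j rest hz; simp [pvZPos] at hz
  | cons x xs ih =>
    intro s c j rest hz
    by_cases hx : x = 0
    · simp only [pvZPos, if_pos hx, List.cons.injEq] at hz
      obtain ⟨hj, hrest⟩ := hz
      subst hj; subst hrest
      simp only [pvSegs, if_pos hx, List.length_cons, List.cons.injEq]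
      refine ⟨by ring, ?_⟩
      rcases hz2 : pvZPos xs (s + 1) with _ | ⟨j2, r2⟩
      · rw [pvSegs_of_zpos_nil xs (s + 1) 1 hz2]
        simp only [pvPd, List.cons.injEq, and_true]
        push_cast; ring
      · rw [ih (s + 1) 1 j2 r2 hz2]
        simp only [pvPd, List.cons.injEq]
        refine ⟨by ring, ?_⟩
        congr 1
        push_cast; ring
    · simp only [pvZPos, if_neg hx] at hz
      simp only [pvSegs, if_neg hx, List.length_cons]
      rw [ih (s + 1) (c + 1) j rest hz]
      simp only [List.cons.injEq]
      refine ⟨by ring, ?_⟩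
      congr 1
      push_cast; ring

lemma pvB_some : ∀ (l : List Int) (r : List Int) (c : Int),
    pvFin (l.foldl pvBStep (r, some c)) = r ++ pvSegs l c := by
  intro l
  induction l with
  | nil => intro r c; simp [pvFin, pvSegs]
  | cons x xs ih =>
    intro r c
    by_cases hx : x = 0
    · simp [List.foldl_cons, pvBStep, hx, ih, pvSegs]
    · simp [List.foldl_cons, pvBStep, hx, ih, pvSegs]

lemma pvB_none_nil : ∀ (l : List Int) (s : Int) (r : List Int),
    pvZPos l s = [] → pvFin (l.foldl pvBStep (r, none)) = [] := by
  intro l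
  induction l with
  | nil => intro s r _; simp [pvFin]
  | cons x xs ih =>
    intro s r hz
    by_cases hx : x = 0
    · simp [pvZPos, hx] at hz
    · simp only [pvZPos, if_neg hx] at hz
      have hb : (x == 0) = false := by simp [hx]
      simp only [List.foldl_cons, pvBStep, hb, Bool.false_eq_true, if_neg (by simp : ¬False)]
      exact ih (s + 1) r hz

lemma pvB_none_cons : ∀ (l : List Int) (s : Int) (r : List Int) (j : Int) (rest : List Int),
    pvZPos l s = j :: rest →
    pvFin (l.foldl pvBStep (r, none)) = r ++ pvPd (j :: rest) (s + l.length) := by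
  intro l
  induction l with
  | nil => intro s r j rest hz; simp [pvZPos] at hz
  | cons x xs ih =>
    intro s r j rest hz
    by_cases hx : x = 0
    · simp only [pvZPos, if_pos hx, List.cons.injEq] at hz
      obtain ⟨hj, hrest⟩ := hz
      subst hj; subst hrest
      have hb : (x == 0) = true := by simp [hx]
      simp only [List.foldl_cons, pvBStep, hb, if_pos trivial]
      rw [pvB_some xs r 1]
      congr 1
      rcases hz2 : pvZPos xs (s + 1) with _ | ⟨j2, r2⟩
      · rw [pvSegs_of_zpos_nil xs (s + 1) 1 hz2]
        simp only [pvPd, List.cons.injEq, and_true, List.length_cons]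
        push_cast; ring
      · rw [pvSegs_of_zpos_cons xs (s + 1) 1 j2 r2 hz2]
        simp only [pvPd, List.cons.injEq, List.length_cons]
        refine ⟨by ring, ?_⟩
        congr 1
        push_cast; ring
    · simp only [pvZPos, if_neg hx] at hz
      have hb : (x == 0) = false := by simp [hx]
      simp only [List.foldl_cons, pvBStep, hb, Bool.false_eq_true, if_neg (by simp : ¬False),
        List.length_cons]
      rw [ih (s + 1) r j rest hz]
      congr 2
      push_cast; ring

lemma pvRangeMap : ∀ (zs : List Int) (m : Int),
    (List.range zs.length).map
      (fun k => (if k + 1 < zs.length then zs.getD (k + 1) 0 else m) - zs.getD k 0) = pvPd zs m := by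
  intro zs
  induction zs with
  | nil => intro m; simp [pvPd]
  | cons a t ih =>
    intro m
    simp only [List.length_cons]
    rw [List.range_succ_eq_map]
    simp only [List.map_cons, List.map_map]
    rcases t with _ | ⟨b, t'⟩
    · simp [pvPd]
    · simp only [pvPd, List.cons.injEq]
      refine ⟨by simp [List.getD], ?_⟩
      rw [← ih m]
      apply List.map_congr_left
      intro k _
      simp only [Function.comp, List.length_cons]
      split_ifs with h1 h2 <;> first | rfl | omega

lemma pvA_nil : ∀ (l : List Int), pvZPos l 0 = [] → get_subsequence_lengths l = [] := by
  intro l hz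
  unfold get_subsequence_lengths
  rcases l with _ | ⟨x, xs⟩
  · simp
  · rw [if_neg (by simp)]
    simp only [pvEnumFilter (x :: xs) 0, hz]
    simp

lemma pvA_cons : ∀ (l : List Int) (j : Int) (rest : List Int),
    pvZPos l 0 = j :: rest →
    get_subsequence_lengths l = 0 :: pvPd (j :: rest) l.length := by
  intro l j rest hz
  unfold get_subsequence_lengths
  rcases l with _ | ⟨x, xs⟩
  · simp [pvZPos] at hz
  · rw [if_neg (by simp)]
    simp only [pvEnumFilter (x :: xs) 0, hz]
    rw [if_neg (by simp)]
    rw [PySem.List.pyRange_one, PySem.List.foldl_append_singleton_eq_map, List.map_map]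
    have hlen : (((j :: rest).length : Int) - 0).toNat = (j :: rest).length := by simp
    rw [hlen]
    have hpt : ∀ k ∈ List.range (j :: rest).length,
        ((fun k : Int =>
            (if k + 1 < ((j :: rest).length : Int) then PySem.List.pyGetD (j :: rest) (k + 1) 0
             else ((x :: xs).length : Int)) - PySem.List.pyGetD (j :: rest) k 0) ∘
          (fun k : Nat => (0 : Int) + k)) k
          = (if k + 1 < (j :: rest).length then (j :: rest).getD (k + 1) 0
             else ((x :: xs).length : Int)) - (j :: rest).getD k 0 := by
      intro k _
      simp only [Function.comp, zero_add]
      congr 1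
      · by_cases hk : k + 1 < (j :: rest).length
        · rw [if_pos (by exact_mod_cast hk), if_pos hk]
          have h1 : (k : Int) + 1 = ((k + 1 : Nat) : Int) := by push_cast; ring
          rw [h1, PySem.List.pyGetD_natCast]
        · rw [if_neg (by exact_mod_cast hk), if_neg hk]
      · rw [PySem.List.pyGetD_natCast]
    rw [List.map_congr_left hpt, pvRangeMap (j :: rest) (((x :: xs).length : Nat) : Int)]
    rfl

-- ===== VERDICT (by name: the statement is the Claim_ definition above) =====
theorem get_subsequence_lengths_spec : Claim_equal_get_subsequence_lengths := by
  intro l _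
  unfold Spec_get_subsequence_lengths
  have hB : get_subsequence_lengths_alt l = pvFin (l.foldl pvBStep ([0], none)) := rfl
  rcases hz : pvZPos l 0 with _ | ⟨j, rest⟩
  · rw [pvA_nil l hz, hB, pvB_none_nil l 0 [0] hz]
  · rw [pvA_cons l j rest hz, hB, pvB_none_cons l 0 [0] j rest hz]
    simp
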